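-- pv_equiv track=rewrite | github.com/garciparedes/python-examples | t3chfest-2017/task-6.py | solution
-- ===== SOURCE A (Python) =====
-- def solution(A):
--     # write your code in Python 2.7
--     result = 0
--     data = dict()
--     for a in A:
--         if not a in data:
--             d = 2 ** a
--             if a % 2 == 1:
--                 d *= -1
--             data[(a)] = d
--         result += data[a]
--     return result
-- ===== SOURCE B (Python) =====
-- def solution(A):
--     # two-phase: frequency table first, then one pass over distinct values
--     counts = {}
--     for a in A:
--         counts[a] = counts.get(a, 0) + 1
--     total = 0
--     for v, c in counts.items():
--         total += c * ((-1 if v % 2 else 1) * 2 ** v)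
--     return total
-- ===== Notes on version B (the rewrite author's own statement) =====
-- stated objective: alternative
-- what changed: Replaces the element-by-element scan with a memo dict by a two-phase pass: build a frequency table of the list, then sum count * signed-power over each distinct value once.
-- outside the precondition, e.g. on solution([-1]): A returns -0.5, B returns -0.5
import Mathlib
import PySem

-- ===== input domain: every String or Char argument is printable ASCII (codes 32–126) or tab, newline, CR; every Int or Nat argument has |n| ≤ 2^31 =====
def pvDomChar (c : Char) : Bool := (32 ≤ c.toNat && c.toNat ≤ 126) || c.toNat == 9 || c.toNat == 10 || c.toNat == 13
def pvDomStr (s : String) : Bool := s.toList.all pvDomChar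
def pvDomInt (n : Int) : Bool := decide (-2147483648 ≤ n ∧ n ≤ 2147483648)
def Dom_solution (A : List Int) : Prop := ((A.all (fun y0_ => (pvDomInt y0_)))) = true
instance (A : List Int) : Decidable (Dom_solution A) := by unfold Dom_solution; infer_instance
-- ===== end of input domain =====

-- B changes the decomposition: a frequency table is built first, then one pass over the
-- distinct values adds count * signed power; same cost, different shape (objective: alternative).

-- ===== PORT A =====
-- A: single scan, memoising the signed power of each value in a dict (one loop iteration).
def solutionStep (st : Int × PySem.Dict Int Int) (a : Int) : Int × PySem.Dict Int Int :=
  let data :=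
    if st.2.contains a then st.2
    else st.2.insert a (if PySem.Int.mod a 2 = 1 then 2 ^ a.toNat * (-1) else 2 ^ a.toNat)
  (st.1 + data.getD a 0, data)

def solution (A : List Int) : Int :=
  (A.foldl solutionStep ((0 : Int), (PySem.Dict.empty : PySem.Dict Int Int))).1

-- ===== PORT B =====
-- B: build a frequency table, then sum count * signed power over the distinct values.
def solution_alt (A : List Int) : Int :=
  let counts : PySem.Dict Int Int :=
    A.foldl (fun d x => d.insert x (d.getD x 0 + 1)) PySem.Dict.empty
  counts.items.foldl
    (fun t p => t + p.2 * ((if PySem.Int.mod p.1 2 ≠ 0 then (-1 : Int) else 1) * 2 ^ p.1.toNat))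
    0

-- ===== PRECONDITION & SPEC =====
-- Pre_ excludes lists containing a negative element: there 2**a is a float in Python, so A
-- returns a float, not an int of the declared type (B does the same).
def Pre_solution (A : List Int) : Prop := ∀ a ∈ A, 0 ≤ a
instance (A : List Int) : Decidable (Pre_solution A) := by unfold Pre_solution; infer_instance
def pvWitness_solution : List Int := [1, 2, 3, 2]

def Spec_solution (A : List Int) (out : Int) : Prop := out = solution_alt A
instance (A : List Int) (out : Int) : Decidable (Spec_solution A out) := by unfold Spec_solution; infer_instance

-- ===== CLAIM (what is proved, stated in full; the proofs are below) =====
def Claim_equal_solution : Prop := ∀ (A : List Int), Dom_solution A → Pre_solution A → Spec_solution A (solution A)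

-- ===== LEMMAS AND PROOFS =====

-- the signed power A memoises for a value a
def pvTerm (a : Int) : Int :=
  if PySem.Int.mod a 2 = 1 then 2 ^ a.toNat * (-1) else 2 ^ a.toNat

lemma pvTerm_eq_b (a : Int) :
    ((if PySem.Int.mod a 2 ≠ 0 then (-1 : Int) else 1) * 2 ^ a.toNat) = pvTerm a := by
  have h0 : (0 : Int) ≤ PySem.Int.mod a 2 := PySem.Int.mod_nonneg a (by norm_num)
  have h2 : PySem.Int.mod a 2 < 2 := PySem.Int.mod_lt a (by norm_num)
  unfold pvTerm
  by_cases h : PySem.Int.mod a 2 = 1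
  · rw [if_pos h, if_pos (by rw [h]; norm_num)]
    ring
  · have h' : PySem.Int.mod a 2 = 0 := by omega
    rw [if_neg h, if_neg (by rw [h']; norm_num)]
    ring

-- A's loop: if every memoised value is the term of its key, the result is r + sum of terms.
lemma loopA (A : List Int) (r : Int) (d : PySem.Dict Int Int)
    (h : ∀ k v, d.get? k = some v → v = pvTerm k) :
    (A.foldl solutionStep (r, d)).1 = r + (A.map pvTerm).sum := by
  induction A generalizing r d with
  | nil => simp
  | cons a t ih =>
    rw [List.foldl_cons, List.map_cons, List.sum_cons]
    by_cases hc : d.contains a = true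
    · have hsome : (d.get? a).isSome := by rw [← PySem.Dict.contains_eq_isSome_get?]; exact hc
      obtain ⟨v, hv⟩ := Option.isSome_iff_exists.mp hsome
      have hstep : solutionStep (r, d) a = (r + d.getD a 0, d) := by
        simp [solutionStep, hc]
      rw [hstep, ih _ _ h, PySem.Dict.getD_eq_get?_getD, hv, h a v hv]
      simp; ring
    · have hstep : solutionStep (r, d) a =
          (r + (d.insert a (pvTerm a)).getD a 0, d.insert a (pvTerm a)) := by
        simp [solutionStep, hc, pvTerm]
      have h' : ∀ k v, ((d.insert a (pvTerm a)).get? k = some v) → v = pvTerm k := by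
        intro k v hk
        rw [PySem.Dict.get?_insert] at hk
        by_cases hka : k = a
        · subst hka; rw [if_pos rfl] at hk; exact (Option.some.inj hk).symm
        · rw [if_neg hka] at hk; exact h k v hk
      rw [hstep, ih _ _ h', PySem.Dict.getD_eq_get?_getD, PySem.Dict.get?_insert_self]
      simp; ring

-- summing g k + (extra at a) over a Nodup list containing a adds the extra once
lemma sum_bump (u : List Int) (a : Int) (g : Int → Int) (c : Int)
    (hnd : u.Nodup) (ha : a ∈ u) :
    (u.map (fun k => if k = a then g k + c else g k)).sum = (u.map g).sum + c := by
  induction u with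
  | nil => cases ha
  | cons x t ih =>
    rcases List.mem_cons.mp ha with hx | ht
    · have hnotin : x ∉ t := (List.nodup_cons.mp hnd).1
      simp only [List.map_cons, List.sum_cons, ← hx]
      have hmap : (t.map (fun k => if k = a then g k + c else g k)) = t.map g := by
        apply List.map_congr_left
        intro k hk
        have hne : k ≠ a := fun h => hnotin (by rw [hx] at h; exact h ▸ hk)
        simp [hne]
      rw [hx] at hmap ⊢
      simp [hmap]
      ring
    · have hnd' := (List.nodup_cons.mp hnd).2
      simp only [List.map_cons, List.sum_cons]
      rw [ih hnd' ht]
      have hx : x ≠ a := fun h => (List.nodup_cons.mp hnd).1 (h ▸ ht)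
      simp [hx]; ring

-- sum over distinct values weighted by multiplicity equals the plain sum of terms
lemma sum_counter (A : List Int) (f : Int → Int) :
    ((PySem.Set.ofList A).map (fun k => (A.count k : Int) * f k)).sum = (A.map f).sum := by
  induction A using List.reverseRecOn with
  | nil => simp [PySem.Set.ofList]
  | append_singleton t a ih =>
    have hset : PySem.Set.ofList (t ++ [a]) = PySem.Set.add (PySem.Set.ofList t) a := by
      rw [PySem.Set.ofList_eq_foldl, PySem.Set.ofList_eq_foldl, List.foldl_append]
      simp
    have hnd : (PySem.Set.ofList t).Nodup := PySem.Set.nodup_ofList t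
    rw [hset, List.map_append, List.sum_append, List.map_singleton, List.sum_singleton]
    by_cases hmem : a ∈ t
    · have hin : a ∈ PySem.Set.ofList t := (PySem.Set.mem_ofList t a).mpr hmem
      have hadd : PySem.Set.add (PySem.Set.ofList t) a = PySem.Set.ofList t := by
        unfold PySem.Set.add
        simp [PySem.Set.contains, hin]
      rw [hadd]
      have hmc : ∀ k, ((t ++ [a]).count k : Int) * f k =
          (if k = a then (t.count k : Int) * f k + f a else (t.count k : Int) * f k) := by
        intro k
        rw [List.count_append]
        by_cases hk : k = a
        · subst hk; simp; ring
        · have hz : List.count k [a] = 0 := by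
            simp [List.count_cons]
            exact fun h => hk h.symm
          simp [hz, hk]
      calc ((PySem.Set.ofList t).map (fun k => ((t ++ [a]).count k : Int) * f k)).sum
          = ((PySem.Set.ofList t).map (fun k =>
              if k = a then (t.count k : Int) * f k + f a else (t.count k : Int) * f k)).sum := by
            apply congrArg; exact List.map_congr_left (fun k _ => hmc k)
        _ = ((PySem.Set.ofList t).map (fun k => (t.count k : Int) * f k)).sum + f a :=
            sum_bump _ a _ (f a) hnd hin
        _ = (t.map f).sum + f a := by rw [ih]
    · have hnin : a ∉ PySem.Set.ofList t := fun h => hmem ((PySem.Set.mem_ofList t a).mp h)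
      have hadd : PySem.Set.add (PySem.Set.ofList t) a = PySem.Set.ofList t ++ [a] := by
        unfold PySem.Set.add
        simp [PySem.Set.contains, hnin]
      rw [hadd, List.map_append, List.sum_append, List.map_singleton, List.sum_singleton]
      have hca : ((t ++ [a]).count a : Int) = t.count a + 1 := by
        rw [List.count_append]; simp
      have hct : ∀ k ∈ PySem.Set.ofList t, ((t ++ [a]).count k : Int) * f k = (t.count k : Int) * f k := by
        intro k hk
        have hne : k ≠ a := fun h => hnin (h ▸ hk)
        have hz : List.count k [a] = 0 := by
          simp [List.count_cons]
          exact fun h => hne h.symm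
        rw [List.count_append, hz]
        simp
      rw [List.map_congr_left hct, ih, hca]
      have hc0 : ((t.count a : Int)) = 0 := by
        simp [List.count_eq_zero_of_not_mem hmem]
      rw [hc0]; ring

-- B computes the weighted sum over the counter's items
lemma altB (A : List Int) : solution_alt A = (A.map pvTerm).sum := by
  unfold solution_alt
  rw [PySem.Dict.foldl_insert_getD_add_one_eq_counter]
  rw [PySem.List.foldl_add
    (g := fun p : Int × Int => p.2 * ((if PySem.Int.mod p.1 2 ≠ 0 then (-1 : Int) else 1) * 2 ^ p.1.toNat))]
  rw [PySem.Dict.items_counter]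
  rw [List.map_map]
  have hmap : ((PySem.Set.ofList A).map
      ((fun p : Int × Int => p.2 * ((if PySem.Int.mod p.1 2 ≠ 0 then (-1 : Int) else 1) * 2 ^ p.1.toNat)) ∘
        fun k => (k, (A.count k : Int)))) =
      (PySem.Set.ofList A).map (fun k => (A.count k : Int) * pvTerm k) := by
    apply List.map_congr_left
    intro k _
    simp only [Function.comp]
    rw [pvTerm_eq_b]
  rw [hmap, sum_counter]
  simp

-- ===== VERDICT (by name: the statement is the Claim_ definition above) =====
theorem solution_spec : Claim_equal_solution := by
  intro A _ _
  unfold Spec_solution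
  rw [altB]
  unfold solution
  rw [loopA A 0 PySem.Dict.empty (by intro k v h; simp [PySem.Dict.get?_empty] at h)]
  ring
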